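-- pv_equiv track=rewrite | github.com/dalmacsernok/The-Keymaker | keymaker.py | remove_odd_blocks
-- ===== SOURCE A (Python) =====
-- def remove_odd_blocks(word, block_length):
--     word = word.lower()
--     blocks = []
--     for i in range(0, len(word), block_length):
--         blocks.append(word[i:i+block_length])
--     splitted_blocks = blocks[0::2]
--     new_string = "".join(splitted_blocks)
--     return new_string
-- ===== SOURCE B (Python) =====
-- def remove_odd_blocks(word, block_length):
--     if block_length <= 0:
--         return ""
--     w = word.lower()
--     return "".join(c for j, c in enumerate(w) if (j // block_length) % 2 == 0)
-- ===== Notes on version B (the rewrite author's own statement) =====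
-- stated objective: alternative
-- what changed: B replaces A's block pipeline (build every block via range/slicing, select blocks[0::2], join) by a per-character filter: it keeps character j of the lowercased word iff (j // block_length) % 2 == 0, so no block list, no slices and no extended-step slice exist in B.
import Mathlib
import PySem

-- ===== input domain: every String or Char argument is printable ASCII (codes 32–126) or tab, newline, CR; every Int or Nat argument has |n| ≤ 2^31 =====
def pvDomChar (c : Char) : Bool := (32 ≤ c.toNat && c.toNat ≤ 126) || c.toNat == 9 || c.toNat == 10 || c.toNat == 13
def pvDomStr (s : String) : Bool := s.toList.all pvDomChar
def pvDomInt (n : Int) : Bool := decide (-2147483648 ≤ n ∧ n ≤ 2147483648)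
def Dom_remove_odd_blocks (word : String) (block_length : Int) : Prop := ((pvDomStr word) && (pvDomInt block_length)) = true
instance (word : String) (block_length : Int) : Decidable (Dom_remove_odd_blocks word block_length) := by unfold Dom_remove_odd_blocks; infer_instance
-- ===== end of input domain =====

-- B drops A's block pipeline (build all blocks, take blocks[0::2], join) and instead keeps
-- character j of the lowercased word iff (j // block_length) % 2 == 0; same O(n) cost.

-- ===== PORT A =====
-- literal transliteration of A; strings handled as their code-point lists (PySem.Chars/List.* are the exact list-level string primitives)
def remove_odd_blocks (word : String) (block_length : Int) : String :=
  let w := (PySem.Str.lower word).toList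
  let blocks := (PySem.List.pyRange 0 (PySem.Chars.len w) block_length).foldl
    (fun acc i => acc ++ [PySem.List.slice w (some i) (some (i + block_length))]) []
  let splitted := (PySem.List.slice? blocks (some 0) none 2).getD []
  String.ofList (PySem.Chars.join [] splitted)

-- ===== PORT B =====
-- literal transliteration of Source B: guard, then one filter over enumerate(w)
def remove_odd_blocks_alt (word : String) (block_length : Int) : String :=
  if block_length ≤ 0 then ""
  else
    let w := (PySem.Str.lower word).toList
    String.ofList ((PySem.List.enumerate w 0).filterMap
      (fun p => if PySem.Int.mod (PySem.Int.floordiv p.1 block_length) 2 = 0 then some p.2 else none))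

-- ===== PRECONDITION & SPEC =====
-- Pre_ excludes only block_length = 0, on which Python's range(0, len, 0) raises ValueError in A.
def Pre_remove_odd_blocks (word : String) (block_length : Int) : Prop := block_length ≠ 0
instance (word : String) (block_length : Int) : Decidable (Pre_remove_odd_blocks word block_length) := by unfold Pre_remove_odd_blocks; infer_instance
def pvWitness_remove_odd_blocks : String × Int := ("abcDef", 2)

def Spec_remove_odd_blocks (word : String) (block_length : Int) (out : String) : Prop := out = remove_odd_blocks_alt word block_length
instance (word : String) (block_length : Int) (out : String) : Decidable (Spec_remove_odd_blocks word block_length out) := by unfold Spec_remove_odd_blocks; infer_instance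

-- ===== CLAIM (what is proved, stated in full; the proofs are below) =====
def Claim_equal_remove_odd_blocks : Prop := ∀ (word : String) (block_length : Int), Dom_remove_odd_blocks word block_length → Pre_remove_odd_blocks word block_length → Spec_remove_odd_blocks word block_length (remove_odd_blocks word block_length)

-- ===== LEMMAS AND PROOFS =====

-- every second element of a list, starting with the head (what xs[0::2] selects)
def pvEvens {α : Type} : List α → List α
  | [] => []
  | [x] => [x]
  | x :: _ :: t => x :: pvEvens t

-- B's filter, as a named function of the (lowercased) character list
def pvKeepF (b : Int) (w : List Char) : List Char :=
  (PySem.List.enumerate w 0).filterMap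
    (fun p => if PySem.Int.mod (PySem.Int.floordiv p.1 b) 2 = 0 then some p.2 else none)

theorem pvEvens_cons {α : Type} (x : α) (xs : List α) :
    pvEvens (x :: xs) = x :: pvEvens (xs.drop 1) := by
  cases xs <;> simp [pvEvens]

theorem pv_filterMap_evens {α : Type} (xs : List α) :
    (List.range ((xs.length + 1) / 2)).filterMap (fun k => xs[2 * k]?) = pvEvens xs := by
  induction xs using pvEvens.induct with
  | case1 => simp [pvEvens]
  | case2 x => simp [pvEvens]
  | case3 x y t ih =>
      have hlen : ((x :: y :: t).length + 1) / 2 = (t.length + 1) / 2 + 1 := by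
        simp; omega
      rw [hlen, List.range_succ_eq_map, List.filterMap_cons, List.filterMap_map]
      simp only [Nat.mul_zero, List.getElem?_cons_zero]
      have hfun : ((fun k => (x :: y :: t)[2 * k]?) ∘ Nat.succ) = (fun k => t[2 * k]?) := by
        funext k
        have h2 : 2 * Nat.succ k = (2 * k + 1) + 1 := by omega
        simp [Function.comp, h2]
      rw [hfun, ih]
      simp [pvEvens]

theorem pv_slice?_zero_two {α : Type} (xs : List α) :
    PySem.List.slice? xs (some 0) none 2 = some (pvEvens xs) := by
  have h2 : (2 : Int) ≠ 0 := by norm_num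
  simp only [PySem.List.slice?, PySem.List.sliceIndices, if_neg h2]
  norm_num
  have hc : (if 0 < xs.length then (((xs.length : Int) + 2 - 1) / 2).toNat else 0)
      = (xs.length + 1) / 2 := by split <;> omega
  have hf : (fun x : Nat => xs[(2 * (x : Int)).toNat]?) = (fun k : Nat => xs[2 * k]?) := by
    funext k
    have hk : (2 * (k : Int)).toNat = 2 * k := by omega
    rw [hk]
  rw [hc, hf, pv_filterMap_evens]

theorem pv_joinNil (ps : List (List Char)) : PySem.Chars.join [] ps = ps.flatten := by
  induction ps with
  | nil => simp [PySem.Chars.join_nil]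
  | cons p q ih =>
      cases q with
      | nil => simp [PySem.Chars.join_singleton]
      | cons r rest =>
          rw [PySem.Chars.join_cons_cons]
          simp at ih ⊢
          rw [ih]

theorem pv_flatMap_single {α β : Type} (f : α → β) (l : List α) :
    List.flatMap (fun i => [f i]) l = l.map f := by
  induction l <;> simp [*]

theorem pv_map_drop1 {α β : Type} (f : α → β) (l : List α) :
    (l.map f).drop 1 = (l.drop 1).map f := by
  cases l <;> simp

theorem pv_pyRange_nil_pos (a c s : Int) (hs : 0 < s) (h : c ≤ a) :
    PySem.List.pyRange a c s = [] := by
  simp [PySem.List.pyRange, hs.ne', if_pos hs, if_neg (not_lt.2 h)]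

theorem pv_pyRange_nil_neg (a c s : Int) (hs : s < 0) (h : a ≤ c) :
    PySem.List.pyRange a c s = [] := by
  simp [PySem.List.pyRange, hs.ne, if_neg (not_lt.2 hs.le), if_neg (not_lt.2 h)]

theorem pv_pyRange_shift (a c d s : Int) (hs : 0 < s) :
    PySem.List.pyRange (a + d) (c + d) s = (PySem.List.pyRange a c s).map (· + d) := by
  simp only [PySem.List.pyRange, if_neg hs.ne', if_pos hs, List.map_map]
  have h3 : (if a + d < c + d then ((c + d - (a + d) + s - 1) / s).toNat else 0)
      = (if a < c then ((c - a + s - 1) / s).toNat else 0) := by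
    have he : c + d - (a + d) = c - a := by ring
    rw [he]
    exact if_congr (by omega) rfl rfl
  rw [h3]
  apply List.map_congr_left
  intro k _
  simp [Function.comp]
  ring

theorem pv_pyRange_cons (a c s : Int) (hs : 0 < s) (h : a < c) :
    PySem.List.pyRange a c s = a :: PySem.List.pyRange (a + s) c s := by
  by_cases h2 : a + s < c
  · have hq0 : (0:Int) ≤ (c - (a + s) + s - 1) / s := Int.ediv_nonneg (by omega) hs.le
    have hdiv : (c - a + s - 1) / s = (c - (a + s) + s - 1) / s + 1 := by
      have he : c - a + s - 1 = (c - (a + s) + s - 1) + 1 * s := by ring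
      rw [he, Int.add_mul_ediv_right _ _ hs.ne']
    simp only [PySem.List.pyRange, if_neg hs.ne', if_pos hs, if_pos h, if_pos h2]
    have hcnt : ((c - a + s - 1) / s).toNat = ((c - (a + s) + s - 1) / s).toNat + 1 := by omega
    rw [hcnt, List.range_succ_eq_map, List.map_cons, List.map_map]
    congr 1
    · simp
    · apply List.map_congr_left
      intro k _
      simp [Function.comp]
      ring
  · have hdiv : (c - a + s - 1) / s = 1 := by
      have he : c - a + s - 1 = (c - a - 1) + 1 * s := by ring
      rw [he, Int.add_mul_ediv_right _ _ hs.ne']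
      have h0 : (c - a - 1) / s = 0 := Int.ediv_eq_zero_of_lt (by omega) (by omega)
      omega
    simp only [PySem.List.pyRange, if_neg hs.ne', if_pos hs, if_pos h, if_neg h2, hdiv]
    norm_num

theorem pv_slice_shift (w : List Char) (i d b : Int) (hi : 0 ≤ i) (hd : 0 ≤ d) (hb : 0 ≤ b) :
    PySem.List.slice w (some (i + d)) (some (i + d + b))
      = PySem.List.slice (w.drop d.toNat) (some i) (some (i + b)) := by
  rw [PySem.List.slice_toNat w (by omega) (by omega),
      PySem.List.slice_toNat _ hi (by omega), List.drop_drop]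
  congr 1
  · omega
  · congr 1
    omega

-- the keep-test of B: for 0 ≤ s < 2b, index s is kept iff s lies in the first block
theorem pv_keep_iff (b s : Int) (hb : 0 < b) (h0 : 0 ≤ s) (h2 : s < 2 * b) :
    (PySem.Int.mod (PySem.Int.floordiv s b) 2 = 0) ↔ s < b := by
  rw [PySem.Int.floordiv_eq_ediv_of_pos hb, PySem.Int.mod_eq_emod_of_pos (by norm_num)]
  by_cases hs : s < b
  · rw [Int.ediv_eq_zero_of_lt h0 hs]
    simp [hs]
  · have hq : s / b = 1 := by
      have he : s = (s - b) + 1 * b := by ring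
      rw [he, Int.add_mul_ediv_right _ _ hb.ne',
        Int.ediv_eq_zero_of_lt (by omega) (by omega)]
      norm_num
    rw [hq]
    simp [hs]

-- shifting all indices by 2b does not change which characters B keeps
theorem pv_keep_shift (b : Int) (hb : 0 < b) (v : List Char) : ∀ s : Int,
    (PySem.List.enumerate v (s + 2 * b)).filterMap
      (fun p => if PySem.Int.mod (PySem.Int.floordiv p.1 b) 2 = 0 then some p.2 else none)
    = (PySem.List.enumerate v s).filterMap
      (fun p => if PySem.Int.mod (PySem.Int.floordiv p.1 b) 2 = 0 then some p.2 else none) := by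
  induction v with
  | nil => intro s; simp [PySem.List.enumerate_nil]
  | cons x xs ih =>
      intro s
      rw [PySem.List.enumerate_cons, PySem.List.enumerate_cons,
        List.filterMap_cons, List.filterMap_cons]
      have hfd : PySem.Int.floordiv (s + 2 * b) b = PySem.Int.floordiv s b + 2 := by
        rw [PySem.Int.floordiv_eq_ediv_of_pos hb, PySem.Int.floordiv_eq_ediv_of_pos hb,
          Int.add_mul_ediv_right _ _ hb.ne']
      have hmd : PySem.Int.mod (PySem.Int.floordiv s b + 2) 2 = PySem.Int.mod (PySem.Int.floordiv s b) 2 := by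
        rw [PySem.Int.mod_eq_emod_of_pos (by norm_num), PySem.Int.mod_eq_emod_of_pos (by norm_num)]
        omega
      have harg : s + 2 * b + 1 = (s + 1) + 2 * b := by ring
      simp only [hfd, hmd, harg, ih (s + 1)]

-- on a list of at most 2b - s indexed characters starting at index s, B keeps exactly
-- those with index below b, i.e. the first (b - s) characters
theorem pv_keep_prefix (b : Int) (hb : 0 < b) (u : List Char) : ∀ s : Int, 0 ≤ s →
    s + u.length ≤ 2 * b →
    (PySem.List.enumerate u s).filterMap
      (fun p => if PySem.Int.mod (PySem.Int.floordiv p.1 b) 2 = 0 then some p.2 else none)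
    = u.take (b - s).toNat := by
  induction u with
  | nil => intro s _ _; simp [PySem.List.enumerate_nil]
  | cons x xs ih =>
      intro s h0 hlen
      rw [PySem.List.enumerate_cons, List.filterMap_cons]
      have h2 : s < 2 * b := by simp at hlen; omega
      by_cases hs : s < b
      · rw [if_pos ((pv_keep_iff b s hb h0 h2).2 hs)]
        rw [ih (s + 1) (by omega) (by simp at hlen ⊢; omega)]
        have ht : (b - s).toNat = (b - (s + 1)).toNat + 1 := by omega
        rw [ht, List.take_succ_cons]
      · rw [if_neg (by rw [pv_keep_iff b s hb h0 h2]; exact hs)]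
        rw [ih (s + 1) (by omega) (by simp at hlen ⊢; omega)]
        have ht : (b - (s + 1)).toNat = 0 := by omega
        have ht' : (b - s).toNat = 0 := by omega
        rw [ht, ht']
        simp

-- B's filter peels one kept block and one skipped block at a time
theorem pvKeepF_step (b : Int) (hb : 0 < b) (w : List Char) :
    pvKeepF b w = w.take b.toNat ++ pvKeepF b (w.drop (2 * b).toNat) := by
  set t : Nat := (2 * b).toNat with ht
  have hsplit : w = w.take t ++ w.drop t := (List.take_append_drop t w).symm
  unfold pvKeepF
  conv_lhs => rw [hsplit]
  rw [PySem.List.enumerate_append, List.filterMap_append]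
  congr 1
  · rw [pv_keep_prefix b hb _ 0 le_rfl (by simp; omega)]
    rw [List.take_take]
    congr 1
    omega
  · by_cases hw : w.length ≤ t
    · have hd : w.drop t = [] := by simp [hw]
      rw [hd]
      simp [PySem.List.enumerate_nil]
    · have hl : ((w.take t).length : Int) = 2 * b := by simp; omega
      rw [hl]
      exact pv_keep_shift b hb _ 0

-- the common core: A's evens-of-all-blocks equals B's index filter, by induction on the word
theorem pv_core (b : Int) (hb : 0 < b) :
    ∀ (m : Nat) (w : List Char), w.length ≤ m →
    (pvEvens ((PySem.List.pyRange 0 (w.length : Int) b).map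
        (fun i => PySem.List.slice w (some i) (some (i + b))))).flatten
      = pvKeepF b w := by
  intro m
  induction m with
  | zero =>
      intro w hw
      have hnil : w = [] := by
        cases w
        · rfl
        · simp at hw
      subst hnil
      simp [pv_pyRange_nil_pos 0 0 b hb le_rfl, pvEvens, pvKeepF, PySem.List.enumerate_nil]
  | succ m ih =>
      intro w hw
      by_cases hnil : w = []
      · subst hnil
        simp [pv_pyRange_nil_pos 0 0 b hb le_rfl, pvEvens, pvKeepF, PySem.List.enumerate_nil]
      · have hn : 0 < w.length := List.length_pos_of_ne_nil hnil
        have hn' : (0:Int) < (w.length : Int) := by exact_mod_cast hn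
        rw [pv_pyRange_cons 0 (w.length : Int) b hb hn', pvKeepF_step b hb w]
        simp only [List.map_cons, pvEvens_cons, List.flatten_cons]
        congr 1
        · rw [PySem.List.slice_toNat w le_rfl (by omega)]
          simp
        rw [pv_map_drop1]
        have hdrop : (PySem.List.pyRange (0 + b) (w.length : Int) b).drop 1
            = PySem.List.pyRange (0 + b + b) (w.length : Int) b := by
          by_cases hbc : 0 + b < (w.length : Int)
          · rw [pv_pyRange_cons _ _ _ hb hbc]
            rfl
          · rw [pv_pyRange_nil_pos _ _ _ hb (by omega), pv_pyRange_nil_pos _ _ _ hb (by omega)]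
            rfl
        rw [hdrop]
        have hsh1 : PySem.List.pyRange (0 + b + b) (w.length : Int) b
            = (PySem.List.pyRange 0 ((w.length : Int) - 2 * b) b).map (· + 2 * b) := by
          rw [← pv_pyRange_shift 0 ((w.length : Int) - 2 * b) (2 * b) b hb]
          congr 1 <;> ring
        rw [hsh1, List.map_map]
        have hmap :
            (PySem.List.pyRange 0 ((w.length : Int) - 2 * b) b).map
              ((fun i => PySem.List.slice w (some i) (some (i + b))) ∘ (· + 2 * b))
            = (PySem.List.pyRange 0 ((w.length : Int) - 2 * b) b).map
              (fun i => PySem.List.slice (w.drop (2 * b).toNat) (some i) (some (i + b))) := by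
          apply List.map_congr_left
          intro i hi
          have hi0 : 0 ≤ i := ((PySem.List.mem_pyRange_iff_of_pos hb i).1 hi).1
          simp only [Function.comp]
          exact pv_slice_shift w i (2 * b) b hi0 (by omega) hb.le
        rw [hmap]
        have hlen : PySem.List.pyRange 0 ((w.length : Int) - 2 * b) b
            = PySem.List.pyRange 0 (((w.drop (2 * b).toNat).length : Int)) b := by
          have hld : (w.drop (2 * b).toNat).length = w.length - (2 * b).toNat := by
            simp
          by_cases hc : (w.length : Int) - 2 * b ≤ 0
          · rw [pv_pyRange_nil_pos _ _ _ hb hc, pv_pyRange_nil_pos _ _ _ hb (by omega)]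
          · have : ((w.drop (2 * b).toNat).length : Int) = (w.length : Int) - 2 * b := by
              omega
            rw [this]
        rw [hlen]
        exact ih (w.drop (2 * b).toNat) (by simp; omega)

-- ===== VERDICT (by name: the statement is the Claim_ definition above) =====
theorem remove_odd_blocks_spec : Claim_equal_remove_odd_blocks := by
  intro word b _hdom hpre
  unfold Spec_remove_odd_blocks remove_odd_blocks remove_odd_blocks_alt
  rcases lt_trichotomy b 0 with hb | hb | hb
  · rw [if_pos hb.le]
    simp only [PySem.List.foldl_append_eq_flatMap, List.nil_append, PySem.Chars.len_eq]
    rw [pv_pyRange_nil_neg _ _ _ hb (by positivity)]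
    simp [pv_slice?_zero_two, pvEvens, PySem.Chars.join_nil]
  · exact absurd hb hpre
  · rw [if_neg (by omega)]
    simp only [PySem.List.foldl_append_eq_flatMap, List.nil_append, PySem.Chars.len_eq]
    apply congrArg
    rw [pv_flatMap_single, pv_slice?_zero_two, Option.getD_some, pv_joinNil]
    exact pv_core b hb _ _ le_rfl
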